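-- pv_equiv track=rewrite | github.com/Jacky1366/OpsChat-lite | backend/chunking.py | get_chunk_stats
-- ===== SOURCE A (Python) =====
-- from typing import List # Imports the List type hint
--
-- def get_chunk_stats(chunks: List[str]) -> dict:
--     """
--     Get statistics about a list of chunks
--
--     Args:
--         chunks: List of text chunks
--
--     Returns:
--         Dictionary with statistics (count, avg_length, min_length, max_length)
--     """
--     if not chunks:
--         return {
--             "count": 0,
--             "avg_length": 0,
--             "min_length": 0,
--             "max_length": 0
--         }
--
--     list = [len(chunk) for chunk in chunks] # store length of each chunk text in a list
--     # eg. chunks = ["Hello world", "This is a test", "im good"] => list = [11, 14, 7]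
--
--     return {
--         "count": len(chunks), #eg. return: 3
--         "avg_length": sum(list) // len(list), # eg. return: (11 + 14 + 7) // 3 = 32 // 3 = 10, Double slash // = integer division (no decimal)
--         "min_length": min(list), # finds the shortest chunk eg. return: 7
--         "max_length": max(list) # finds the longest chunk eg. return: 14
--     }
-- ===== SOURCE B (Python) =====
-- def get_chunk_stats(chunks):
--     if not chunks:
--         return {"count": 0, "avg_length": 0, "min_length": 0, "max_length": 0}
--     total = lo = hi = len(chunks[0])
--     n = 1
--     for c in chunks[1:]:
--         L = len(c)
--         total += L
--         n += 1
--         if L < lo: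
--             lo = L
--         if L > hi:
--             hi = L
--     return {"count": n, "avg_length": total // n, "min_length": lo, "max_length": hi}
-- ===== Notes on version B (the rewrite author's own statement) =====
-- stated objective: alternative
-- what changed: Replaces the intermediate length list and the four separate passes (len/sum/min/max) by a single accumulating loop that maintains total, count, running min and running max.
import Mathlib
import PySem

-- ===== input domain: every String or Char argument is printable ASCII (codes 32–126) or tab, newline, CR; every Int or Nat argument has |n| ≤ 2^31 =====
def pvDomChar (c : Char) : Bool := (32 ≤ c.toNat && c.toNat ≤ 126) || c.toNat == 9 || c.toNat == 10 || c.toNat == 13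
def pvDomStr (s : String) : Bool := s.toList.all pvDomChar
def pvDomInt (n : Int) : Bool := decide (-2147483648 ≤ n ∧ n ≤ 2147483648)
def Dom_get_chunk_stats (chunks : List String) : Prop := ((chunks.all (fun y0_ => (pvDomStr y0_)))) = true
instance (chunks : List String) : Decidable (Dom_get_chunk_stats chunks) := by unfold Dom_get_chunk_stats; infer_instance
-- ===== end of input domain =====

-- ===== PORT A =====
-- Port of A: builds the length list, then count / sum-floordiv / min / max.
def get_chunk_stats (chunks : List String) : List (String × Int) :=
  if chunks = [] then
    [("count", 0), ("avg_length", 0), ("min_length", 0), ("max_length", 0)]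
  else
    let lst : List Int := chunks.map (fun c => (PySem.Str.len c : Int))
    [("count", (chunks.length : Int)),
     ("avg_length", PySem.Int.floordiv lst.sum (lst.length : Int)),
     ("min_length", (PySem.List.min? lst (fun x => x)).getD 0),
     ("max_length", (PySem.List.max? lst (fun x => x)).getD 0)]

-- ===== PORT B =====
-- Port of B: one accumulating pass over chunks[1:], seeded from the first chunk.
def get_chunk_stats_alt (chunks : List String) : List (String × Int) :=
  match chunks with
  | [] => [("count", 0), ("avg_length", 0), ("min_length", 0), ("max_length", 0)]
  | c0 :: rest =>
    let L0 : Int := PySem.Str.len c0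
    let st := rest.foldl
      (fun (s : Int × Int × Int × Int) c =>
        let L : Int := PySem.Str.len c
        (s.1 + L,
         (if L < s.2.1 then L else s.2.1),
         (if L > s.2.2.1 then L else s.2.2.1),
         s.2.2.2 + 1)) (L0, L0, L0, 1)
    [("count", st.2.2.2), ("avg_length", PySem.Int.floordiv st.1 st.2.2.2),
     ("min_length", st.2.1), ("max_length", st.2.2.1)]

-- ===== PRECONDITION & SPEC =====
def Spec_get_chunk_stats (chunks : List String) (out : List (String × Int)) : Prop := out = get_chunk_stats_alt chunks
instance (chunks : List String) (out : List (String × Int)) : Decidable (Spec_get_chunk_stats chunks out) := by unfold Spec_get_chunk_stats; infer_instance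

-- ===== CLAIM (what is proved, stated in full; the proofs are below) =====
def Claim_equal_get_chunk_stats : Prop := ∀ (chunks : List String), Dom_get_chunk_stats chunks → Spec_get_chunk_stats chunks (get_chunk_stats chunks)

-- ===== LEMMAS AND PROOFS =====

-- The single-pass fold of B computes (seed+sum, running min, running max, seed count + length).
theorem pv_fold_inv (rest : List String) (t lo hi n : Int) :
    rest.foldl
      (fun (s : Int × Int × Int × Int) c =>
        let L : Int := PySem.Str.len c
        (s.1 + L,
         (if L < s.2.1 then L else s.2.1),
         (if L > s.2.2.1 then L else s.2.2.1),
         s.2.2.2 + 1)) (t, lo, hi, n)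
    = (t + (rest.map (fun c => (PySem.Str.len c : Int))).sum,
       (rest.map (fun c => (PySem.Str.len c : Int))).foldl min lo,
       (rest.map (fun c => (PySem.Str.len c : Int))).foldl max hi,
       n + rest.length) := by
  induction rest generalizing t lo hi n with
  | nil => simp
  | cons c cs ih =>
    simp only [List.foldl_cons, List.map_cons, List.sum_cons, List.length_cons, ih]
    have hmin : (if (PySem.Str.len c : Int) < lo then (PySem.Str.len c : Int) else lo)
        = min lo (PySem.Str.len c : Int) := by
      rcases lt_or_ge (PySem.Str.len c : Int) lo with h | h <;> simp [min_def] <;> omega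
    have hmax : (if (PySem.Str.len c : Int) > hi then (PySem.Str.len c : Int) else hi)
        = max hi (PySem.Str.len c : Int) := by
      rcases lt_or_ge hi (PySem.Str.len c : Int) with h | h <;> simp [max_def] <;> omega
    rw [hmin, hmax, Prod.ext_iff, Prod.ext_iff, Prod.ext_iff]
    refine ⟨by ring, rfl, rfl, by push_cast; ring⟩

-- ===== VERDICT (by name: the statement is the Claim_ definition above) =====
theorem get_chunk_stats_spec : Claim_equal_get_chunk_stats := by
  intro chunks _
  unfold Spec_get_chunk_stats get_chunk_stats get_chunk_stats_alt
  match chunks with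
  | [] => rfl
  | c0 :: rest =>
    simp only [pv_fold_inv, List.map_cons, List.sum_cons, List.length_map, List.length_cons,
      PySem.List.min?_id_cons, PySem.List.max?_id_cons, Option.getD_some,
      reduceCtorEq, if_false]
    push_cast
    ring_nf
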